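-- pv_equiv track=rewrite | github.com/leolilley/context-kiwi | context_kiwi/tools/publish.py | _escape_nested_cdata
-- ===== SOURCE A (Python) =====
-- def _escape_nested_cdata(xml_content: str) -> str:
--     """
--     Escape nested CDATA blocks for XML validation.
--
--     XML doesn't support nested CDATA - when you have:
--         <template><![CDATA[
--             <action><![CDATA[content]]></action>
--         ]]></template>
--
--     The inner ]]> terminates the outer CDATA prematurely, causing parse errors.
--
--     For validation purposes, we process CDATA sections character by character,
--     tracking nesting depth, and escape any nested CDATA markers.
--     """
--     result = []
--     i = 0
--     cdata_start = '<![CDATA['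
--     cdata_end = ']]>'
--
--     while i < len(xml_content):
--         # Check for CDATA start
--         if xml_content[i:i+len(cdata_start)] == cdata_start:
--             # Found CDATA start, now find the matching end
--             # accounting for any nested CDATA markers
--             result.append(cdata_start)
--             i += len(cdata_start)
--             depth = 1
--
--             while i < len(xml_content) and depth > 0:
--                 if xml_content[i:i+len(cdata_start)] == cdata_start:
--                     # Nested CDATA start - escape it
--                     result.append('&lt;![CDATA[')
--                     i += len(cdata_start)
--                     depth += 1
--                 elif xml_content[i:i+len(cdata_end)] == cdata_end:
--                     depth -= 1
--                     if depth == 0: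
--                         # This is the closing of our outermost CDATA
--                         result.append(cdata_end)
--                     else:
--                         # Nested CDATA end - escape it
--                         result.append(']]&gt;')
--                     i += len(cdata_end)
--                 else:
--                     result.append(xml_content[i])
--                     i += 1
--         else:
--             result.append(xml_content[i])
--             i += 1
--
--     return ''.join(result)
-- ===== SOURCE B (Python) =====
-- def _escape_nested_cdata(xml_content: str) -> str:
--     """Two-pass rewrite: tokenize into marker/text tokens, then run a single
--     depth-counting state machine over the token stream."""
--     START = '<![CDATA['
--     END = ']]>'
--     # pass 1: split the string into verbatim text chunks and marker tokens
--     tokens = []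
--     buf = []
--     i = 0
--     n = len(xml_content)
--     while i < n:
--         if xml_content.startswith(START, i):
--             if buf:
--                 tokens.append(('text', ''.join(buf)))
--                 buf = []
--             tokens.append(('start', None))
--             i += len(START)
--         elif xml_content.startswith(END, i):
--             if buf:
--                 tokens.append(('text', ''.join(buf)))
--                 buf = []
--             tokens.append(('end', None))
--             i += len(END)
--         else:
--             buf.append(xml_content[i])
--             i += 1
--     if buf:
--         tokens.append(('text', ''.join(buf)))
--     # pass 2: one depth counter decides how each marker is rendered
--     out = []
--     depth = 0
--     for kind, text in tokens:
--         if kind == 'text':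
--             out.append(text)
--         elif kind == 'start':
--             out.append(START if depth == 0 else '&lt;![CDATA[')
--             depth += 1
--         else:
--             if depth == 0:
--                 out.append(END)
--             else:
--                 depth -= 1
--                 out.append(END if depth == 0 else ']]&gt;')
--     return ''.join(out)
-- ===== Notes on version B (the rewrite author's own statement) =====
-- stated objective: alternative
-- what changed: Replaces A's nested character-by-character while loops (outer scan plus inner depth-tracking scan) with a two-pass decomposition: first tokenize the string into verbatim text chunks and CDATA start/end marker tokens, then run a single depth-counting state machine over the token stream.
import Mathlib
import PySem

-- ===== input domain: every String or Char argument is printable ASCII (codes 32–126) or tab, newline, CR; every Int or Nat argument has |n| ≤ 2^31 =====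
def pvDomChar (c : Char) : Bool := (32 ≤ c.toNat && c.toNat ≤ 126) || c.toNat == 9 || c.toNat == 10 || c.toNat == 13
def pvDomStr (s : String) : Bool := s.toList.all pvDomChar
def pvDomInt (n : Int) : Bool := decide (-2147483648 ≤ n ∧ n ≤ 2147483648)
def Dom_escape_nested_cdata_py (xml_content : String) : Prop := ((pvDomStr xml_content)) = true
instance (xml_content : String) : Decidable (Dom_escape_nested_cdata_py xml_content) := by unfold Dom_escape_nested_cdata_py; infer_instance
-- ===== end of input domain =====

-- B replaces A's nested char-by-char loops by a two-pass decomposition (tokenize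
-- into marker/text tokens, then one depth-counting state machine over the tokens);
-- objective: alternative decomposition, same exact output.

-- ===== PORT A =====
-- the two marker literals
def pvStart : List Char := "<![CDATA[".toList
def pvEnd : List Char := "]]>".toList

theorem pvStart_length : pvStart.length = 9 := rfl
theorem pvEnd_length : pvEnd.length = 3 := rfl

theorem pvPrefixLen {m cs : List Char} (h : m.isPrefixOf cs = true) :
    m.length ≤ cs.length :=
  (List.isPrefixOf_iff_prefix.mp h).length_le

-- termination measures for the two loops (small named lemmas keep the
-- well-founded recursion packaging small)
theorem pvWfStartOut {c : Char} {rest : List Char}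
    (h : pvStart.isPrefixOf (c :: rest) = true) :
    2 * ((c :: rest).drop pvStart.length).length + 1 < 2 * (c :: rest).length := by
  have := pvPrefixLen h
  simp only [pvStart_length, List.length_drop, List.length_cons] at this ⊢
  omega

theorem pvWfStartIn {c : Char} {rest : List Char}
    (h : pvStart.isPrefixOf (c :: rest) = true) :
    2 * ((c :: rest).drop pvStart.length).length + 1 < 2 * (c :: rest).length + 1 := by
  have := pvPrefixLen h
  simp only [pvStart_length, List.length_drop, List.length_cons] at this ⊢
  omega

theorem pvWfEndIn {c : Char} {rest : List Char}
    (h : pvEnd.isPrefixOf (c :: rest) = true) :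
    2 * ((c :: rest).drop pvEnd.length).length + 1 < 2 * (c :: rest).length + 1 := by
  have := pvPrefixLen h
  simp only [pvEnd_length, List.length_drop, List.length_cons] at this ⊢
  omega

theorem pvWfTailIn {c : Char} {rest : List Char} :
    2 * rest.length + 1 < 2 * (c :: rest).length + 1 := by
  simp only [List.length_cons]
  omega

theorem pvWfExit (cs : List Char) : 2 * cs.length < 2 * cs.length + 1 :=
  Nat.lt_succ_self _

theorem pvWfTailOut {c : Char} {rest : List Char} :
    2 * rest.length < 2 * (c :: rest).length := by
  simp only [List.length_cons]
  omega

-- A's nested while loops, as mutually recursive scans over the remaining suffix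
-- (xml_content[i:i+k] == marker is the prefix test on the suffix from i).
mutual
def pvEscAOuter : List Char → List Char
  | [] => []
  | c :: rest =>
    if pvStart.isPrefixOf (c :: rest) then
      pvStart ++ pvEscAInner ((c :: rest).drop pvStart.length) 1
    else
      c :: pvEscAOuter rest
termination_by cs => 2 * cs.length
decreasing_by
  · rename_i h
    exact pvWfStartOut h
  · exact pvWfTailOut

-- A's inner loop `while i < len(xml_content) and depth > 0`; when it stops,
-- control returns to the outer loop at the remaining suffix.
def pvEscAInner (cs : List Char) (d : Nat) : List Char :=
  match cs with
  | [] => pvEscAOuter []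
  | c :: rest =>
    if d = 0 then pvEscAOuter (c :: rest)
    else if pvStart.isPrefixOf (c :: rest) then
      "&lt;![CDATA[".toList ++ pvEscAInner ((c :: rest).drop pvStart.length) (d + 1)
    else if pvEnd.isPrefixOf (c :: rest) then
      if d - 1 = 0 then pvEnd ++ pvEscAInner ((c :: rest).drop pvEnd.length) (d - 1)
      else "]]&gt;".toList ++ pvEscAInner ((c :: rest).drop pvEnd.length) (d - 1)
    else
      c :: pvEscAInner rest d
termination_by 2 * cs.length + 1
decreasing_by
  · exact pvWfExit []
  · exact pvWfExit (c :: rest)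
  · rename_i h
    exact pvWfStartIn h
  · rename_i h _
    exact pvWfEndIn h
  · rename_i h _
    exact pvWfEndIn h
  · exact pvWfTailIn
end

def escape_nested_cdata_py (xml_content : String) : String :=
  String.mk (pvEscAOuter xml_content.toList)

-- ===== PORT B =====
-- B's token type: verbatim text chunk, '<![CDATA[' marker, ']]>' marker
inductive PvTok : Type
  | text : List Char → PvTok
  | tstart : PvTok
  | tend : PvTok

theorem pvWfTokStart {c : Char} {rest : List Char}
    (h : pvStart.isPrefixOf (c :: rest) = true) :
    ((c :: rest).drop pvStart.length).length < (c :: rest).length := by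
  have := pvPrefixLen h
  simp only [pvStart_length, List.length_drop, List.length_cons] at this ⊢
  omega

theorem pvWfTokEnd {c : Char} {rest : List Char}
    (h : pvEnd.isPrefixOf (c :: rest) = true) :
    ((c :: rest).drop pvEnd.length).length < (c :: rest).length := by
  have := pvPrefixLen h
  simp only [pvEnd_length, List.length_drop, List.length_cons] at this ⊢
  omega

theorem pvWfTok {c : Char} {rest : List Char} : rest.length < (c :: rest).length := by
  simp only [List.length_cons]
  omega

-- pass 1 of Source B: tokenize, accumulating plain chars in `buf` and flushing the
-- buffer as a text token before each marker token (and at the end).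
def pvTokenize (buf : List Char) (cs : List Char) : List PvTok :=
  match cs with
  | [] => if buf = [] then [] else [.text buf]
  | c :: rest =>
    if pvStart.isPrefixOf (c :: rest) then
      (if buf = [] then [] else [.text buf]) ++
        .tstart :: pvTokenize [] ((c :: rest).drop pvStart.length)
    else if pvEnd.isPrefixOf (c :: rest) then
      (if buf = [] then [] else [.text buf]) ++
        .tend :: pvTokenize [] ((c :: rest).drop pvEnd.length)
    else
      pvTokenize (buf ++ [c]) rest
termination_by cs.length
decreasing_by
  · rename_i h
    exact pvWfTokStart h
  · rename_i h
    exact pvWfTokEnd h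
  · exact pvWfTok

-- pass 2 of Source B: one depth counter decides how each marker is rendered
def pvRender (d : Nat) : List PvTok → List Char
  | [] => []
  | .text t :: ts => t ++ pvRender d ts
  | .tstart :: ts =>
      (if d = 0 then pvStart else "&lt;![CDATA[".toList) ++ pvRender (d + 1) ts
  | .tend :: ts =>
      if d = 0 then pvEnd ++ pvRender 0 ts
      else if d - 1 = 0 then pvEnd ++ pvRender (d - 1) ts
      else "]]&gt;".toList ++ pvRender (d - 1) ts

def escape_nested_cdata_py_alt (xml_content : String) : String :=
  String.mk (pvRender 0 (pvTokenize [] xml_content.toList))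

-- ===== PRECONDITION & SPEC =====
def Spec_escape_nested_cdata_py (xml_content : String) (out : String) : Prop := out = escape_nested_cdata_py_alt xml_content
instance (xml_content : String) (out : String) : Decidable (Spec_escape_nested_cdata_py xml_content out) := by unfold Spec_escape_nested_cdata_py; infer_instance

-- ===== CLAIM (what is proved, stated in full; the proofs are below) =====
def Claim_equal_escape_nested_cdata_py : Prop := ∀ (xml_content : String), Dom_escape_nested_cdata_py xml_content → Spec_escape_nested_cdata_py xml_content (escape_nested_cdata_py xml_content)

-- ===== LEMMAS AND PROOFS =====

-- a start marker cannot begin at a char other than '<'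
theorem pvStart_not_prefix {c : Char} (hne : ¬ c = '<') (l : List Char) :
    pvStart.isPrefixOf (c :: l) = false := by
  simp [pvStart, List.isPrefixOf]
  intro h
  exact absurd h.symm hne

-- the buffer only delays its chars: rendering tokenize buf cs prepends buf
theorem pvRender_tokenize_buf (n : Nat) :
    ∀ cs : List Char, cs.length ≤ n → ∀ buf d,
      pvRender d (pvTokenize buf cs) = buf ++ pvRender d (pvTokenize [] cs) := by
  induction n with
  | zero =>
    intro cs h buf d
    have : cs = [] := by cases cs <;> simp_all
    subst this
    by_cases hb : buf = [] <;> simp [pvTokenize, pvRender, hb]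
  | succ n ih =>
    intro cs h buf d
    match cs with
    | [] => by_cases hb : buf = [] <;> simp [pvTokenize, pvRender, hb]
    | c :: rest =>
      by_cases hs : pvStart.isPrefixOf (c :: rest)
      · by_cases hb : buf = [] <;> simp [pvTokenize, hs, hb, pvRender]
      · by_cases he : pvEnd.isPrefixOf (c :: rest)
        · by_cases hb : buf = [] <;> simp [pvTokenize, hs, he, hb, pvRender]
        · have hr : rest.length ≤ n := by simp at h; omega
          rw [show pvTokenize buf (c :: rest) = pvTokenize (buf ++ [c]) rest by
                simp [pvTokenize, hs, he],
              show pvTokenize [] (c :: rest) = pvTokenize [c] rest by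
                simp [pvTokenize, hs, he],
              ih rest hr (buf ++ [c]) d, ih rest hr [c] d]
          simp

theorem pvEnd_head {cs : List Char} (h : pvEnd.isPrefixOf cs = true) :
    ∃ rest, cs = ']' :: ']' :: '>' :: rest := by
  rw [List.isPrefixOf_iff_prefix] at h
  obtain ⟨t, ht⟩ := h
  exact ⟨t, ht.symm⟩

-- A's outer loop copies a ']]>' marker one char at a time: none of the three
-- positions can begin a '<![CDATA[' marker
theorem pvOuter_end (rest : List Char) :
    pvEscAOuter (']' :: ']' :: '>' :: rest) = ']' :: ']' :: '>' :: pvEscAOuter rest := by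
  rw [pvEscAOuter, if_neg (by simp [pvStart_not_prefix]),
      pvEscAOuter, if_neg (by simp [pvStart_not_prefix]),
      pvEscAOuter, if_neg (by simp [pvStart_not_prefix])]

-- the inner loop with depth 0 immediately returns control to the outer loop
theorem pvInner_zero (cs : List Char) : pvEscAInner cs 0 = pvEscAOuter cs := by
  cases cs <;> simp [pvEscAInner]

-- main induction: B's render ∘ tokenize equals A's outer loop (d = 0) resp.
-- A's inner loop at depth d ≥ 1
theorem pvMain (n : Nat) :
    ∀ cs : List Char, cs.length ≤ n → ∀ d : Nat,
      pvRender d (pvTokenize [] cs) =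
        (if d = 0 then pvEscAOuter cs else pvEscAInner cs d) := by
  induction n with
  | zero =>
    intro cs h d
    have : cs = [] := by cases cs <;> simp_all
    subst this
    by_cases hd : d = 0 <;> simp [pvTokenize, pvRender, pvEscAOuter, pvEscAInner, hd]
  | succ n ih =>
    intro cs h d
    match cs with
    | [] =>
      by_cases hd : d = 0 <;> simp [pvTokenize, pvRender, pvEscAOuter, pvEscAInner, hd]
    | c :: rest =>
      by_cases hs : pvStart.isPrefixOf (c :: rest)
      · -- start marker: both emit the (escaped) start and continue at depth d + 1
        have hlen : ((c :: rest).drop pvStart.length).length ≤ n := by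
          simp only [pvStart_length, List.length_drop, List.length_cons] at h ⊢
          omega
        have hrec := ih _ hlen (d + 1)
        simp only [if_neg (Nat.succ_ne_zero d)] at hrec
        rw [show pvTokenize [] (c :: rest) =
              .tstart :: pvTokenize [] ((c :: rest).drop pvStart.length) by
              simp [pvTokenize, hs]]
        by_cases hd : d = 0
        · subst hd
          rw [if_pos rfl, pvEscAOuter, if_pos hs]
          simp [pvRender, hrec]
        · rw [if_neg hd, pvEscAInner]
          simp only [if_neg hd, if_pos hs]
          simp [pvRender, hd, hrec]
      · by_cases he : pvEnd.isPrefixOf (c :: rest)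
        · -- end marker
          have hlen : ((c :: rest).drop pvEnd.length).length ≤ n := by
            simp only [pvEnd_length, List.length_drop, List.length_cons] at h ⊢
            omega
          rw [show pvTokenize [] (c :: rest) =
                .tend :: pvTokenize [] ((c :: rest).drop pvEnd.length) by
                simp [pvTokenize, hs, he]]
          obtain ⟨rest', hcs⟩ := pvEnd_head he
          have hdrop : (c :: rest).drop pvEnd.length = rest' := by
            rw [hcs]; rfl
          by_cases hd : d = 0
          · subst hd
            have hrec := ih _ hlen 0
            rw [if_pos rfl] at hrec
            rw [if_pos rfl,
                show pvRender 0 (PvTok.tend :: pvTokenize [] ((c :: rest).drop pvEnd.length))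
                  = pvEnd ++ pvRender 0 (pvTokenize [] ((c :: rest).drop pvEnd.length)) by
                  simp [pvRender],
                hrec, hdrop, hcs, pvOuter_end]
            rfl
          · by_cases hd2 : d = 1
            · subst hd2
              have hrec := ih _ hlen 0
              rw [if_pos rfl] at hrec
              rw [if_neg hd, pvEscAInner]
              simp only [if_neg hd, if_neg hs, if_pos he]
              simp [pvRender, pvInner_zero, hrec]
            · have hrec := ih _ hlen (d - 1)
              rw [if_neg (by omega : ¬ d - 1 = 0)] at hrec
              rw [if_neg hd, pvEscAInner]
              simp only [if_neg hd, if_neg hs, if_pos he,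
                if_neg (by omega : ¬ d - 1 = 0)]
              simp [pvRender, hd, show ¬ d - 1 = 0 by omega, hrec]
        · -- plain char: tokenizer buffers it, A copies it
          have hr : rest.length ≤ n := by simp at h; omega
          rw [show pvTokenize [] (c :: rest) = pvTokenize [c] rest by
                simp [pvTokenize, hs, he],
              pvRender_tokenize_buf n rest hr [c] d]
          have hrec := ih rest hr d
          by_cases hd : d = 0
          · subst hd
            rw [if_pos rfl] at hrec ⊢
            rw [pvEscAOuter, if_neg hs]
            simp [hrec]
          · rw [if_neg hd] at hrec ⊢
            rw [pvEscAInner]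
            simp only [if_neg hd, if_neg hs, if_neg he]
            simp [hrec]

-- ===== VERDICT (by name: the statement is the Claim_ definition above) =====
theorem escape_nested_cdata_py_spec : Claim_equal_escape_nested_cdata_py := by
  intro s _
  unfold Spec_escape_nested_cdata_py escape_nested_cdata_py escape_nested_cdata_py_alt
  rw [pvMain s.toList.length s.toList le_rfl 0, if_pos rfl]
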